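-- pv_equiv track=rewrite | github.com/RuizhenMai/academic-blog | leetcode/test.py | substringk
-- ===== SOURCE A (Python) =====
-- def substringk(s, k):
--     '''
--     Given a string s and an int k, return all unique substrings of s of size k with k distinct characters.
--
--     sliding window
--     '''
--
--     if len(s) == 0 or len(s) < k or k == 0:
--         return []
--
--
--     ans = set()
--     letter = {}
--
--     start = 0 # start index of the window
--     for i,c in enumerate(s):
--         if c in letter and letter[c] >= start:
--             start = letter[c] + 1 # update the start position
--
--         letter[c] = i # record the position
--         if i - start + 1 == k:
--             ans.add(s[start:i+1])
--             start += 1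
--
--     return ans
-- ===== SOURCE B (Python) =====
-- def substringk(s, k):
--     if len(s) == 0 or len(s) < k or k == 0:
--         return []
--     ans = set()
--     if k > 0:
--         for i in range(len(s) - k + 1):
--             sub = s[i:i+k]
--             if len(set(sub)) == k:
--                 ans.add(sub)
--     return ans
-- ===== Notes on version B (the rewrite author's own statement) =====
-- stated objective: simpler
-- what changed: Replaces A's incremental sliding-window bookkeeping (last-seen-position dict plus a moving window start) with a direct scan over all window start positions that tests each k-length slice independently for k distinct characters.
import Mathlib
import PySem

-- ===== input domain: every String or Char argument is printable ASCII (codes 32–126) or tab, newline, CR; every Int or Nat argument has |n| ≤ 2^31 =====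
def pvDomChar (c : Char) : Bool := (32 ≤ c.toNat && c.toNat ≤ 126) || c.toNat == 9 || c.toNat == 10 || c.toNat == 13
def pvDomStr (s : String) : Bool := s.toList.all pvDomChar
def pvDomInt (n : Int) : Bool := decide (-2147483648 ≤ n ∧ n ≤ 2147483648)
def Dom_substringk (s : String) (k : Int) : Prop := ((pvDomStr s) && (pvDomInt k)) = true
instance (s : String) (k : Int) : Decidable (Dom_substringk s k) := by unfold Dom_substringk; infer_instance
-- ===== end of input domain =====

-- B re-implements the function with an independent per-window distinct-character check in place of
-- A's sliding-window/last-seen-position bookkeeping (objective: simpler; not faster).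

-- ===== PORT A =====
-- one iteration of A's `for i,c in enumerate(s)` loop over the state (ans, letter, start)
def substringkStep (s : String) (k : Int)
    (st : PySem.Set String × PySem.Dict Char Int × Int) (ic : Int × Char) :
    PySem.Set String × PySem.Dict Char Int × Int :=
  let ans := st.1
  let letter := st.2.1
  let start := st.2.2
  let i := ic.1
  let c := ic.2
  -- if c in letter and letter[c] >= start: start = letter[c] + 1
  let start :=
    match letter.get? c with
    | some p => if p ≥ start then p + 1 else start
    | none => start
  -- letter[c] = i
  let letter := letter.insert c i
  -- if i - start + 1 == k: ans.add(s[start:i+1]); start += 1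
  if i - start + 1 = k then
    (PySem.Set.add ans (PySem.Str.slice s (some start) (some (i + 1))), letter, start + 1)
  else
    (ans, letter, start)

def substringk (s : String) (k : Int) : List String :=
  if PySem.Str.len s = 0 ∨ PySem.Str.len s < k ∨ k = 0 then []
  else
    ((PySem.List.enumerate s.toList).foldl (substringkStep s k)
      (PySem.Set.empty, PySem.Dict.empty, 0)).1

-- ===== PORT B =====
-- one iteration of B's `for i in range(len(s) - k + 1)` loop
def substringkAltStep (s : String) (k : Int) (ans : PySem.Set String) (i : Int) :
    PySem.Set String :=
  let sub := PySem.Str.slice s (some i) (some (i + k))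
  if PySem.Set.len (PySem.Set.ofList sub.toList) = k then PySem.Set.add ans sub else ans

def substringk_alt (s : String) (k : Int) : List String :=
  if PySem.Str.len s = 0 ∨ PySem.Str.len s < k ∨ k = 0 then []
  else if 0 < k then
    (PySem.List.pyRange 0 (PySem.Str.len s - k + 1)).foldl (substringkAltStep s k)
      PySem.Set.empty
  else PySem.Set.empty

-- ===== PRECONDITION & SPEC =====
def Spec_substringk (s : String) (k : Int) (out : List String) : Prop := out = substringk_alt s k
instance (s : String) (k : Int) (out : List String) : Decidable (Spec_substringk s k out) := by unfold Spec_substringk; infer_instance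

-- ===== CLAIM (what is proved, stated in full; the proofs are below) =====
def Claim_equal_substringk : Prop := ∀ (s : String) (k : Int), Dom_substringk s k → Spec_substringk s k (substringk s k)

-- ===== LEMMAS AND PROOFS =====

-- the canonical accumulation both loops compute: over window starts j = 0 .. m-k,
-- add the window s[j:j+k] exactly when its characters are pairwise distinct
def specStep (s : String) (k : Int) (a : PySem.Set String) (j : Int) : PySem.Set String :=
  if ((s.toList.drop j.toNat).take k.toNat).Nodup then
    PySem.Set.add a (PySem.Str.slice s (some j) (some (j + k)))
  else a

def specF (s : String) (k : Int) (m : Int) : PySem.Set String :=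
  (PySem.List.pyRange 0 (m - k + 1)).foldl (specStep s k) []

-- the loop invariant of A's sliding window after the first m characters have been processed
def InvA (s : String) (k : Int) (m : Nat)
    (st : PySem.Set String × PySem.Dict Char Int × Int) : Prop :=
  st.1 = specF s k m ∧
  0 ≤ st.2.2 ∧ st.2.2 ≤ (m : Int) ∧
  ((s.toList.take m).drop st.2.2.toNat).Nodup ∧
  (m : Int) - k + 1 ≤ st.2.2 ∧
  (∀ t : Nat, ((s.toList.take m).drop t).Nodup → st.2.2 ≤ max ((m : Int) - k + 1) (t : Int)) ∧
  (∀ x : Char,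
    (st.2.1.get? x = none → x ∉ s.toList.take m) ∧
    (∀ p : Int, st.2.1.get? x = some p →
      0 ≤ p ∧ p < (m : Int) ∧ (s.toList.take m)[p.toNat]? = some x ∧
        x ∉ (s.toList.take m).drop (p.toNat + 1)))

lemma set_ofList_sublist {α : Type} [BEq α] [LawfulBEq α] (l : List α) :
    (PySem.Set.ofList l).Sublist l := by
  induction l with
  | nil => simp [PySem.Set.ofList]
  | cons x xs ih =>
    rw [PySem.Set.ofList_cons]
    exact List.Sublist.cons₂ x (List.Sublist.trans (List.filter_sublist) ih)

lemma set_len_eq_iff_nodup {α : Type} [BEq α] [LawfulBEq α] (l : List α) :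
    (PySem.Set.ofList l).length = l.length ↔ l.Nodup := by
  constructor
  · intro h
    have := (set_ofList_sublist l).eq_of_length h
    rw [← this]; exact PySem.Set.nodup_ofList l
  · intro h; rw [PySem.Set.ofList_eq_self_of_nodup l h]

-- A's loop on the k < 0 path: the window-length test never fires, ans stays empty
lemma loopA_neg (s : String) (k : Int) (hk : k < 0) :
    ∀ (rest : List Char) (m : Nat) (st : PySem.Set String × PySem.Dict Char Int × Int),
      0 ≤ st.2.2 → st.2.2 ≤ (m : Int) →
      (∀ x p, st.2.1.get? x = some p → p < (m : Int)) →
      ((PySem.List.enumerate rest (m : Int)).foldl (substringkStep s k) st).1 = st.1 := by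
  intro rest
  induction rest with
  | nil => intro m st _ _ _; simp [PySem.List.enumerate]
  | cons c rest ih =>
    intro m st h0 hm hl
    rw [PySem.List.enumerate_cons, List.foldl_cons]
    have hcast : ((m : Int) + 1) = (((m + 1 : Nat)) : Int) := by push_cast; ring
    cases hc : st.2.1.get? c with
    | none =>
      have hcond : ¬ ((m : Int) - st.2.2 + 1 = k) := by omega
      simp only [substringkStep, hc, if_neg hcond]
      rw [hcast]
      refine ih (m + 1) (st.1, st.2.1.insert c (m : Int), st.2.2) h0 (by push_cast; omega) ?_
      intro x p hx
      by_cases hxc : x = c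
      · subst hxc
        rw [PySem.Dict.get?_insert_self] at hx
        cases hx; push_cast; omega
      · rw [PySem.Dict.get?_insert_of_ne _ _ hxc] at hx
        have := hl x p hx; push_cast; omega
    | some p =>
      have hp := hl c p hc
      by_cases hps : p ≥ st.2.2
      · have hcond : ¬ ((m : Int) - (p + 1) + 1 = k) := by omega
        simp only [substringkStep, hc, if_pos hps, if_neg hcond]
        rw [hcast]
        refine ih (m + 1) (st.1, st.2.1.insert c (m : Int), p + 1)
          (by show (0:Int) ≤ p + 1; omega) (by show p + 1 ≤ (((m+1:Nat)):Int); push_cast; omega) ?_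
        intro x q hx
        by_cases hxc : x = c
        · subst hxc; rw [PySem.Dict.get?_insert_self] at hx; cases hx; push_cast; omega
        · rw [PySem.Dict.get?_insert_of_ne _ _ hxc] at hx
          have := hl x q hx; push_cast; omega
      · have hcond : ¬ ((m : Int) - st.2.2 + 1 = k) := by omega
        simp only [substringkStep, hc, if_neg hps, if_neg hcond]
        rw [hcast]
        refine ih (m + 1) (st.1, st.2.1.insert c (m : Int), st.2.2) h0 (by push_cast; omega) ?_
        intro x q hx
        by_cases hxc : x = c
        · subst hxc; rw [PySem.Dict.get?_insert_self] at hx; cases hx; push_cast; omega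
        · rw [PySem.Dict.get?_insert_of_ne _ _ hxc] at hx
          have := hl x q hx; push_cast; omega

-- A's loop preserves InvA (main case 1 ≤ k ≤ len(s))
lemma stepA_preserves (s : String) (k : Int) (hk1 : 1 ≤ k)
    (pre : List Char) (c : Char) (rest : List Char)
    (hsplit : s.toList = pre ++ c :: rest)
    (st : PySem.Set String × PySem.Dict Char Int × Int)
    (hInv : InvA s k pre.length st) :
    InvA s k (pre.length + 1) (substringkStep s k st ((pre.length : Int), c)) := by
  obtain ⟨ans, letter, start⟩ := st
  obtain ⟨hans, h0, hsm, hnd, hii, hiii, hlet⟩ := hInv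
  simp only at hans h0 hsm hnd hii hiii hlet
  have htake0 : s.toList.take pre.length = pre := by rw [hsplit, List.take_left]
  have htake1 : s.toList.take (pre.length + 1) = pre ++ [c] := by
    rw [hsplit, show pre ++ c :: rest = (pre ++ [c]) ++ rest by simp]
    rw [show pre.length + 1 = (pre ++ [c]).length by simp, List.take_left]
  rw [htake0] at hnd hiii hlet
  set m := pre.length with hm
  -- split the (pre ++ [c]) windows into the pre part and membership of c
  have hsplitnd : ∀ t : Nat, t ≤ m →
      (((pre ++ [c]).drop t).Nodup ↔ (pre.drop t).Nodup ∧ c ∉ pre.drop t) := by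
    intro t ht
    rw [List.drop_append_of_le_length ht, ← List.concat_eq_append, List.nodup_concat,
      and_comm]
  have hdropmono : ∀ {a b : Nat}, a ≤ b → (pre.drop a).Nodup → (pre.drop b).Nodup := by
    intro a b hab hn
    have : pre.drop b = (pre.drop a).drop (b - a) := by rw [List.drop_drop]; congr 1; omega
    rw [this]; exact hn.sublist (List.drop_sublist _ _)
  -- the updated start (before the window-length test) and its properties
  obtain ⟨s1, hstep, hs1l, hs1u, hnd1, hiii1⟩ :
      ∃ s1 : Int,
        (substringkStep s k (ans, letter, start) ((m : Int), c) =
          if (m : Int) - s1 + 1 = k then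
            (PySem.Set.add ans (PySem.Str.slice s (some s1) (some ((m : Int) + 1))),
              letter.insert c (m : Int), s1 + 1)
          else (ans, letter.insert c (m : Int), s1)) ∧
        start ≤ s1 ∧ s1 ≤ (m : Int) ∧
        (((pre ++ [c]).drop s1.toNat).Nodup) ∧
        (∀ t : Nat, ((pre ++ [c]).drop t).Nodup → s1 ≤ max ((m : Int) - k + 1) (t : Int)) := by
    cases hc : letter.get? c with
    | none =>
      have hcnot : c ∉ pre := (hlet c).1 hc
      refine ⟨start, by simp only [substringkStep, hc], le_refl _, hsm, ?_, ?_⟩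
      · rw [hsplitnd start.toNat (by omega)]
        exact ⟨hnd, fun hmem => hcnot (List.mem_of_mem_drop hmem)⟩
      · intro t hndt
        by_cases ht : t ≤ m
        · have := hiii t ((hsplitnd t ht).mp hndt).1
          omega
        · omega
    | some p =>
      obtain ⟨hp0, hpm, hpidx, hpafter⟩ := (hlet c).2 p hc
      have hple : p.toNat < pre.length := by omega
      have hmemdrop : ∀ t : Nat, t ≤ p.toNat → c ∈ pre.drop t := by
        intro t ht
        apply List.mem_of_getElem? (i := p.toNat - t)
        rw [List.getElem?_drop, show t + (p.toNat - t) = p.toNat by omega]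
        exact hpidx
      by_cases hps : p ≥ start
      · refine ⟨p + 1, by simp only [substringkStep, hc, if_pos hps], by omega, by omega, ?_, ?_⟩
        · have hpt : (p + 1).toNat = p.toNat + 1 := by omega
          rw [hpt, hsplitnd (p.toNat + 1) (by omega)]
          exact ⟨hdropmono (by omega) hnd,
            fun hmem => hpafter hmem⟩
        · intro t hndt
          by_cases ht : t ≤ m
          · have hcnot := ((hsplitnd t ht).mp hndt).2
            have : ¬ t ≤ p.toNat := fun h => hcnot (hmemdrop t h)
            omega
          · omega
      · refine ⟨start, by simp only [substringkStep, hc, if_neg hps], le_refl _, hsm, ?_, ?_⟩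
        · rw [hsplitnd start.toNat (by omega)]
          refine ⟨hnd, fun hmem => ?_⟩
          have hsub : List.Sublist (pre.drop start.toNat) (pre.drop (p.toNat + 1)) := by
            have he : pre.drop start.toNat
                = (pre.drop (p.toNat + 1)).drop (start.toNat - (p.toNat + 1)) := by
              rw [List.drop_drop]; congr 1; omega
            rw [he]; exact List.drop_sublist _ _
          exact hpafter (hsub.subset hmem)
        · intro t hndt
          by_cases ht : t ≤ m
          · have := hiii t ((hsplitnd t ht).mp hndt).1
            omega
          · omega
  have hs10 : 0 ≤ s1 := le_trans h0 hs1l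
  -- the updated last-seen dictionary describes pre ++ [c]
  have hlet_insert : ∀ x : Char,
      ((letter.insert c (m : Int)).get? x = none → x ∉ pre ++ [c]) ∧
      (∀ p : Int, (letter.insert c (m : Int)).get? x = some p →
        0 ≤ p ∧ p < ((m + 1 : Nat) : Int) ∧ (pre ++ [c])[p.toNat]? = some x ∧
          x ∉ (pre ++ [c]).drop (p.toNat + 1)) := by
    intro x
    by_cases hxc : x = c
    · rw [hxc]
      constructor
      · intro hnone
        rw [PySem.Dict.get?_insert_self] at hnone
        cases hnone
      · intro p hp
        rw [PySem.Dict.get?_insert_self] at hp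
        obtain rfl : (m : Int) = p := by injection hp
        refine ⟨Int.natCast_nonneg m, by push_cast; omega, ?_, ?_⟩
        · have e : ((m : Int)).toNat = pre.length := by rw [hm]; exact Int.toNat_natCast _
          rw [e]
          exact List.getElem?_concat_length
        · have e : ((m : Int)).toNat + 1 = (pre ++ [c]).length := by
            simp [hm]
          rw [e, List.drop_length]
          simp
    · constructor
      · intro hnone
        rw [PySem.Dict.get?_insert_of_ne _ _ hxc] at hnone
        have := (hlet x).1 hnone
        simp only [List.mem_append, List.mem_singleton]
        rintro (h | h)
        · exact this h
        · exact hxc h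
      · intro p hp
        rw [PySem.Dict.get?_insert_of_ne _ _ hxc] at hp
        obtain ⟨h1, h2, h3, h4⟩ := (hlet x).2 p hp
        refine ⟨h1, by push_cast; omega, ?_, ?_⟩
        · rw [List.getElem?_append_left (by omega)]
          exact h3
        · rw [List.drop_append_of_le_length (by omega)]
          simp only [List.mem_append, List.mem_singleton]
          rintro (h | h)
          · exact h4 h
          · exact hxc h
  rw [hstep]
  by_cases hsmall : (m : Int) - k + 1 < 0
  · -- the window has not yet reached length k: no add is possible
    have hcond : ¬ ((m : Int) - s1 + 1 = k) := by omega
    rw [if_neg hcond]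
    have hspec : specF s k ((m + 1 : Nat) : Int) = specF s k m := by
      rw [specF, specF, PySem.List.pyRange_one_eq_nil (by push_cast; omega),
        PySem.List.pyRange_one_eq_nil (by omega)]
    refine ⟨by show ans = specF s k ((m + 1 : Nat) : Int); rw [hspec]; exact hans,
      by simpa using hs10, by push_cast; omega, ?_,
      by push_cast; omega, ?_, ?_⟩
    · rw [htake1]; exact hnd1
    · intro t hndt
      rw [htake1] at hndt
      have := hiii1 t hndt
      push_cast
      omega
    · rw [htake1]
      exact hlet_insert
  · push Not at hsmall
    set j : Int := (m : Int) - k + 1 with hj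
    have hWdrop : (pre ++ [c]).drop j.toNat = (s.toList.drop j.toNat).take k.toNat := by
      rw [← htake1, List.drop_take]
      congr 1
      omega
    have hadd_iff : ((m : Int) - s1 + 1 = k) ↔ ((s.toList.drop j.toNat).take k.toNat).Nodup := by
      constructor
      · intro h
        rw [← hWdrop]
        have : s1 = j := by omega
        rw [← this]
        exact hnd1
      · intro h
        rw [← hWdrop] at h
        have h1 := hiii1 j.toNat h
        have h2 : ((j.toNat : Nat) : Int) = j := by omega
        rw [h2] at h1
        omega
    have hspec : specF s k ((m + 1 : Nat) : Int) =
        specStep s k (specF s k m) j := by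
      rw [specF, specF, show ((m + 1 : Nat) : Int) - k + 1 = j + 1 by push_cast; omega,
        PySem.List.pyRange_one_succ_right (by omega), List.foldl_append]
      rfl
    by_cases hcond : (m : Int) - s1 + 1 = k
    · rw [if_pos hcond]
      have hs1j : s1 = j := by omega
      have hslice : PySem.Str.slice s (some s1) (some ((m : Int) + 1)) =
          PySem.Str.slice s (some j) (some (j + k)) := by
        rw [hs1j]; congr 2; omega
      have hans' : PySem.Set.add ans (PySem.Str.slice s (some s1) (some ((m : Int) + 1))) =
          specF s k ((m + 1 : Nat) : Int) := by
        rw [hspec, specStep, if_pos (hadd_iff.mp hcond), hans, hslice]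
      refine ⟨hans', by show (0:Int) ≤ s1 + 1; omega,
        by show s1 + 1 ≤ ((m + 1 : Nat) : Int); push_cast; omega, ?_,
        by show ((m + 1 : Nat) : Int) - k + 1 ≤ s1 + 1; push_cast; omega, ?_, ?_⟩
      · rw [htake1]
        have : (s1 + 1).toNat = s1.toNat + 1 := by omega
        rw [this]
        exact hnd1.sublist (by
          have h1 : (pre ++ [c]).drop (s1.toNat + 1) = ((pre ++ [c]).drop s1.toNat).drop 1 := by
            rw [List.drop_drop]
          rw [h1]; exact List.drop_sublist _ _)
      · intro t hndt
        simp only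
        push_cast
        omega
      · rw [htake1]
        exact hlet_insert
    · rw [if_neg hcond]
      have hans' : ans = specF s k ((m + 1 : Nat) : Int) := by
        rw [hspec, specStep, if_neg (fun h => hcond (hadd_iff.mpr h)), hans]
      refine ⟨hans', hs10, by push_cast; omega, ?_,
        by push_cast; omega, ?_, ?_⟩
      · rw [htake1]; exact hnd1
      · intro t hndt
        rw [htake1] at hndt
        have := hiii1 t hndt
        push_cast
        omega
      · rw [htake1]
        exact hlet_insert

lemma loopA (s : String) (k : Int) (hk1 : 1 ≤ k) :
    ∀ (rest pre : List Char) (st : PySem.Set String × PySem.Dict Char Int × Int),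
      s.toList = pre ++ rest → InvA s k pre.length st →
      InvA s k (pre.length + rest.length)
        ((PySem.List.enumerate rest (pre.length : Int)).foldl (substringkStep s k) st) := by
  intro rest
  induction rest with
  | nil => intro pre st _ h; simpa using h
  | cons c rest ih =>
    intro pre st hsplit hInv
    rw [PySem.List.enumerate_cons, List.foldl_cons]
    have h1 := stepA_preserves s k hk1 pre c rest hsplit st hInv
    have h2 := ih (pre ++ [c]) _ (by simpa using hsplit) (by simpa using h1)
    have e2 : (pre.length : Int) + 1 = ((pre ++ [c]).length : Int) := by simp
    rw [e2]
    have e : pre.length + (c :: rest).length = (pre ++ [c]).length + rest.length := by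
      simp; omega
    rw [e]
    exact h2

-- B's loop computes specF
lemma altB_eq_specF (s : String) (k : Int) (hk1 : 1 ≤ k)
    (hkn : k ≤ (s.toList.length : Int)) :
    (PySem.List.pyRange 0 ((s.toList.length : Int) - k + 1)).foldl (substringkAltStep s k)
      PySem.Set.empty = specF s k (s.toList.length : Int) := by
  apply PySem.List.foldl_congr_mem
  intro a j hj
  rw [PySem.List.mem_pyRange_one] at hj
  obtain ⟨hj0, hj1⟩ := hj
  have hjk : 0 ≤ j + k := by omega
  have htl : (PySem.Str.slice s (some j) (some (j + k))).toList
      = (s.toList.drop j.toNat).take k.toNat := by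
    rw [PySem.Str.toList_slice, PySem.Chars.slice_eq_listSlice, PySem.List.slice_toNat _ hj0 hjk]
    congr 1
    omega
  have hlen : ((s.toList.drop j.toNat).take k.toNat).length = k.toNat := by
    rw [List.length_take, List.length_drop]
    omega
  have hcond : (PySem.Set.len (PySem.Set.ofList ((s.toList.drop j.toNat).take k.toNat)) = k)
      ↔ ((s.toList.drop j.toNat).take k.toNat).Nodup := by
    rw [← set_len_eq_iff_nodup, hlen, PySem.Set.len]
    omega
  simp only [substringkAltStep, specStep, htl]
  exact if_congr hcond rfl rfl

lemma invA_base (s : String) (k : Int) (hk1 : 1 ≤ k) :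
    InvA s k 0 (PySem.Set.empty, PySem.Dict.empty, 0) := by
  refine ⟨?_, le_refl _, by simp, by simp, by simp; omega, ?_, ?_⟩
  · rw [specF, PySem.List.pyRange_one_eq_nil (by omega)]
    rfl
  · intro t _
    simp only [Nat.cast_zero]
    omega
  · intro x
    constructor
    · intro _; simp
    · intro p hp
      simp [PySem.Dict.get?, PySem.Dict.empty] at hp

theorem substringk_spec : Claim_equal_substringk := by
  intro s k _
  show substringk s k = substringk_alt s k
  by_cases hg : PySem.Str.len s = 0 ∨ PySem.Str.len s < k ∨ k = 0
  · rw [substringk, substringk_alt, if_pos hg, if_pos hg]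
  · rw [substringk, substringk_alt, if_neg hg, if_neg hg]
    push Not at hg
    obtain ⟨h0, h1, h2⟩ := hg
    rcases Int.lt_or_le k 0 with hk | hk
    · have hA := loopA_neg s k hk s.toList 0 (PySem.Set.empty, PySem.Dict.empty, 0)
        (le_refl _) (by simp) (by intro x p hp; simp [PySem.Dict.get?, PySem.Dict.empty] at hp)
      simp only [Nat.cast_zero] at hA
      rw [hA, if_neg (by omega)]
    · have hk1 : 1 ≤ k := by omega
      rw [PySem.Str.len_eq] at h1 ⊢
      have h := loopA s k hk1 s.toList [] (PySem.Set.empty, PySem.Dict.empty, 0)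
        (by simp) (invA_base s k hk1)
      simp only [List.length_nil, Nat.cast_zero, zero_add] at h
      rw [if_pos (by omega : (0:Int) < k), altB_eq_specF s k hk1 h1]
      exact h.1
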